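-- pv_equiv track=rewrite | github.com/huijuo14/wrkf | dynamic_bid_monitor.py | should_check_bids_due_to_completion
-- ===== SOURCE A (Python) =====
-- def should_check_bids_due_to_completion(campaigns):
--     """Determine if we should check bids based on campaign completion percentages"""
--     if not campaigns:
--         return False, "No active campaigns to monitor"
--
--     # Check if any campaign is under 90% completion (aggressive monitoring)
--     under_90_percent = [c for c in campaigns if c['completion_percentage'] < 90]
--     if under_90_percent:
--         return True, "At least one campaign is under 90% completion - aggressive monitoring"
--
--     # Check if any campaign is under 95% completion (normal monitoring)
--     under_95_percent = [c for c in campaigns if c['completion_percentage'] < 95]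
--     if under_95_percent:
--         return True, "At least one campaign is under 95% completion - normal monitoring"
--
--     # All campaigns are 95%+ completed, reduce check frequency
--     return False, "All campaigns are 95%+ completed - reduce monitoring frequency"
-- ===== SOURCE B (Python) =====
-- def should_check_bids_due_to_completion(campaigns):
--     """Determine if we should check bids based on campaign completion percentages"""
--     if not campaigns:
--         return False, "No active campaigns to monitor"
--     m = min(c['completion_percentage'] for c in campaigns)
--     if m < 90:
--         return True, "At least one campaign is under 90% completion - aggressive monitoring"
--     if m < 95:
--         return True, "At least one campaign is under 95% completion - normal monitoring"
--     return False, "All campaigns are 95%+ completed - reduce monitoring frequency"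
-- ===== Notes on version B (the rewrite author's own statement) =====
-- stated objective: simpler
-- what changed: Replaces the two list-comprehension filter scans with a single min aggregation followed by threshold comparisons.
import Mathlib
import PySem

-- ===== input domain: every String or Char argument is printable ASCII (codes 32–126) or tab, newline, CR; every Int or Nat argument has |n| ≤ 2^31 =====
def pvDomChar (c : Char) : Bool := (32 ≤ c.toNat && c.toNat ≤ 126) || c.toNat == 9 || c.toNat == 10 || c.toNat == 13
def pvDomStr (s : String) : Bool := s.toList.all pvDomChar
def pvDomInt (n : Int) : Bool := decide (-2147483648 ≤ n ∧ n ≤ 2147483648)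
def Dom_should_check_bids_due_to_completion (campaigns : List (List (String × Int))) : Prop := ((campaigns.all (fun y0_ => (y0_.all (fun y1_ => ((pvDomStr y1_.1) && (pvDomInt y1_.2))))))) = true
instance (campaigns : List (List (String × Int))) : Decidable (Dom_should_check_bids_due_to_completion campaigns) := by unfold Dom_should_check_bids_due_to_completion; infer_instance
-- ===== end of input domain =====

-- B replaces A's two filter scans by one min aggregation plus threshold comparisons (objective: simpler).

-- ===== PORT A =====
-- c['completion_percentage']; on inputs satisfying Pre_ the key is present, so getD 0 never fires
def pvVal (c : List (String × Int)) : Int := (c.lookup "completion_percentage").getD 0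

def should_check_bids_due_to_completion (campaigns : List (List (String × Int))) : Bool × String :=
  if campaigns = [] then (false, "No active campaigns to monitor")
  else
    let under_90_percent := campaigns.filter (fun c => pvVal c < 90)
    if under_90_percent ≠ [] then (true, "At least one campaign is under 90% completion - aggressive monitoring")
    else
      let under_95_percent := campaigns.filter (fun c => pvVal c < 95)
      if under_95_percent ≠ [] then (true, "At least one campaign is under 95% completion - normal monitoring")
      else (false, "All campaigns are 95%+ completed - reduce monitoring frequency")

-- ===== PORT B =====
def should_check_bids_due_to_completion_alt (campaigns : List (List (String × Int))) : Bool × String :=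
  match campaigns with
  | [] => (false, "No active campaigns to monitor")
  | c :: rest =>
    let m := rest.foldl (fun acc d => min acc (pvVal d)) (pvVal c)
    if m < 90 then (true, "At least one campaign is under 90% completion - aggressive monitoring")
    else if m < 95 then (true, "At least one campaign is under 95% completion - normal monitoring")
    else (false, "All campaigns are 95%+ completed - reduce monitoring frequency")

-- ===== PRECONDITION & SPEC =====
-- Pre_ excludes campaigns missing the 'completion_percentage' key, on which A raises KeyError.
def Pre_should_check_bids_due_to_completion (campaigns : List (List (String × Int))) : Prop :=
  ∀ c ∈ campaigns, (c.lookup "completion_percentage").isSome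
instance (campaigns : List (List (String × Int))) : Decidable (Pre_should_check_bids_due_to_completion campaigns) := by unfold Pre_should_check_bids_due_to_completion; infer_instance
def pvWitness_should_check_bids_due_to_completion : (List (List (String × Int))) := [[("completion_percentage", 50)]]

def Spec_should_check_bids_due_to_completion (campaigns : List (List (String × Int))) (out : Bool × String) : Prop := out = should_check_bids_due_to_completion_alt campaigns
instance (campaigns : List (List (String × Int))) (out : Bool × String) : Decidable (Spec_should_check_bids_due_to_completion campaigns out) := by unfold Spec_should_check_bids_due_to_completion; infer_instance

-- ===== CLAIM (what is proved, stated in full; the proofs are below) =====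
def Claim_equal_should_check_bids_due_to_completion : Prop := ∀ (campaigns : List (List (String × Int))), Dom_should_check_bids_due_to_completion campaigns → Pre_should_check_bids_due_to_completion campaigns → Spec_should_check_bids_due_to_completion campaigns (should_check_bids_due_to_completion campaigns)

-- ===== LEMMAS AND PROOFS =====

theorem pv_foldl_min_lt (d : Int) (t : List (List (String × Int))) (a : Int) :
    (t.foldl (fun acc c => min acc (pvVal c)) a < d) ↔ (a < d ∨ ∃ c ∈ t, pvVal c < d) := by
  induction t generalizing a with
  | nil => simp
  | cons h tl ih =>
    simp only [List.foldl_cons, ih, min_lt_iff, List.mem_cons]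
    constructor
    · rintro (( ha | hh) | ⟨c, hc, hcd⟩)
      · exact Or.inl ha
      · exact Or.inr ⟨h, Or.inl rfl, hh⟩
      · exact Or.inr ⟨c, Or.inr hc, hcd⟩
    · rintro (ha | ⟨c, (rfl | hc), hcd⟩)
      · exact Or.inl (Or.inl ha)
      · exact Or.inl (Or.inr hcd)
      · exact Or.inr ⟨c, hc, hcd⟩

theorem pv_filter_ne_nil (d : Int) (l : List (List (String × Int))) :
    (l.filter (fun c => pvVal c < d) ≠ []) ↔ ∃ c ∈ l, pvVal c < d := by
  simp only [ne_eq, List.filter_eq_nil_iff]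
  push Not
  simp

-- ===== VERDICT (by name: the statement is the Claim_ definition above) =====
theorem should_check_bids_due_to_completion_spec : Claim_equal_should_check_bids_due_to_completion := by
  intro campaigns _ _
  unfold Spec_should_check_bids_due_to_completion should_check_bids_due_to_completion should_check_bids_due_to_completion_alt
  match campaigns with
  | [] => simp
  | c :: rest =>
    simp only [if_neg (List.cons_ne_nil c rest)]
    by_cases h90 : ∃ x ∈ c :: rest, pvVal x < 90
    · rw [if_pos ((pv_filter_ne_nil 90 (c :: rest)).mpr h90)]
      have : rest.foldl (fun acc d => min acc (pvVal d)) (pvVal c) < 90 := by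
        rw [pv_foldl_min_lt]; simpa [List.mem_cons, or_and_right, exists_or, exists_eq_left] using h90
      rw [if_pos this]
    · rw [if_neg (fun hf => h90 ((pv_filter_ne_nil 90 (c :: rest)).mp hf))]
      have h90' : ¬ rest.foldl (fun acc d => min acc (pvVal d)) (pvVal c) < 90 := by
        rw [pv_foldl_min_lt]
        simpa [List.mem_cons, or_and_right, exists_or, exists_eq_left] using h90
      rw [if_neg h90']
      by_cases h95 : ∃ x ∈ c :: rest, pvVal x < 95
      · rw [if_pos ((pv_filter_ne_nil 95 (c :: rest)).mpr h95)]
        have : rest.foldl (fun acc d => min acc (pvVal d)) (pvVal c) < 95 := by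
          rw [pv_foldl_min_lt]; simpa [List.mem_cons, or_and_right, exists_or, exists_eq_left] using h95
        rw [if_pos this]
      · rw [if_neg (fun hf => h95 ((pv_filter_ne_nil 95 (c :: rest)).mp hf))]
        have h95' : ¬ rest.foldl (fun acc d => min acc (pvVal d)) (pvVal c) < 95 := by
          rw [pv_foldl_min_lt]
          simpa [List.mem_cons, or_and_right, exists_or, exists_eq_left] using h95
        rw [if_neg h95']
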